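-- pv_equiv track=rewrite | github.com/MohiuddinSohel/Leetcoding | amazonOAPreparation/OA.py | max_rectangle_area
-- ===== SOURCE A (Python) =====
-- def max_rectangle_area(arr):
--     arr.sort(reverse= True)
--     max_area, pairs, r = 0, [], 1
--     while r < len(arr):
--         if arr[r - 1] == arr[r] or arr[r - 1] - 1 == arr[r]:
--             pairs.append(arr[r])
--             r += 2
--         else:
--             r += 1
--         if len(pairs) == 2:
--             max_area += (pairs[0] * pairs[1])
--             pairs = []
--
--     return max_area
-- ===== SOURCE B (Python) =====
-- def max_rectangle_area(arr):
--     # Counter-based: no sort of arr (A sorts arr in place; equivalence is about the return value).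
--     counts = {}
--     for x in arr:
--         counts[x] = counts.get(x, 0) + 1
--     sides = []
--     carry = None
--     for v in sorted(counts, reverse=True):
--         k = counts[v]
--         if carry is not None and carry - 1 == v:
--             sides.append(v)
--             k -= 1
--         carry = v if k % 2 else None
--         sides += [v] * (k // 2)
--     area = 0
--     i = 0
--     while i + 1 < len(sides):
--         area += sides[i] * sides[i + 1]
--         i += 2
--     return area
-- ===== Notes on version B (the rewrite author's own statement) =====
-- stated objective: alternative
-- what changed: Replaces A's index scan over the fully sorted array with a hash-counter algorithm: count occurrences in a dict, iterate only the distinct values in descending order with a carry for an odd leftover (pairing within a run, and a leftover with the next value when they differ by 1), then multiply consecutive collected sides; B does not sort or mutate arr.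
import Mathlib
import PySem

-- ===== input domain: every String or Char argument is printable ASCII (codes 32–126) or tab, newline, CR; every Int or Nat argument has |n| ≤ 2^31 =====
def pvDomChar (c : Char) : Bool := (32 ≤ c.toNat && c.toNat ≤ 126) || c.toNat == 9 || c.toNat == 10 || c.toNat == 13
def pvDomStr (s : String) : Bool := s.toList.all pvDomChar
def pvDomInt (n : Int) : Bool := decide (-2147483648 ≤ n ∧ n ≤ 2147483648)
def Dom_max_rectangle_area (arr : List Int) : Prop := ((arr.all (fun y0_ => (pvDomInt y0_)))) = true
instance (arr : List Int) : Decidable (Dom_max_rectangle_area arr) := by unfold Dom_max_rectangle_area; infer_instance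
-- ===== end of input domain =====

-- B replaces A's scan over the fully sorted array by a hash-counter over the distinct values with
-- a carry for the odd leftover; equivalence is about the RETURN value only (A sorts arr in place,
-- B does not mutate arr).

-- ===== PORT A =====
-- A's while loop over index r with the running `pairs` buffer; indices r-1, r are always in
-- range (1 ≤ r < len), so List.getD is exact for Python's arr[r-1] / arr[r] here.
def pvLoopA (arr : List Int) (r : Nat) (pairs : List Int) (acc : Int) : Int :=
  if _h : r < arr.length then
    if arr.getD (r - 1) 0 = arr.getD r 0 ∨ arr.getD (r - 1) 0 - 1 = arr.getD r 0 then
      let pairs1 := pairs ++ [arr.getD r 0]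
      if pairs1.length = 2 then
        pvLoopA arr (r + 2) [] (acc + pairs1.getD 0 0 * pairs1.getD 1 0)
      else
        pvLoopA arr (r + 2) pairs1 acc
    else
      if pairs.length = 2 then
        pvLoopA arr (r + 1) [] (acc + pairs.getD 0 0 * pairs.getD 1 0)
      else
        pvLoopA arr (r + 1) pairs acc
  else acc
termination_by arr.length - r

def max_rectangle_area (arr : List Int) : Int :=
  pvLoopA (PySem.List.sorted arr (fun x => x) true) 1 [] 0

-- ===== PORT B =====
-- one iteration of B's `for v in sorted(counts, reverse=True)` loop; state = (sides, carry)
def pvStepB (counts : PySem.Dict Int Int) (st : List Int × Option Int) (v : Int) : List Int × Option Int :=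
  let k0 := counts.getD v 0           -- k = counts[v]; exact: v is a key of counts
  let p : List Int × Int :=
    match st.2 with                   -- if carry is not None and carry - 1 == v: append v; k -= 1
    | some cp => if cp - 1 = v then (st.1 ++ [v], k0 - 1) else (st.1, k0)
    | none => (st.1, k0)
  (p.1 ++ PySem.List.pyRepeat [v] (PySem.Int.floordiv p.2 2),   -- sides += [v] * (k // 2)
   if PySem.Int.mod p.2 2 ≠ 0 then some v else none)            -- carry = v if k % 2 else None

-- B's final while loop over index i: area += sides[i] * sides[i+1]; i += 2; the loop guard
-- keeps i, i+1 in range, so List.getD is exact for Python's sides[i] / sides[i+1] here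
def pvAreaIdx (sides : List Int) (i : Nat) (acc : Int) : Int :=
  if _h : i + 1 < sides.length then
    pvAreaIdx sides (i + 2) (acc + sides.getD i 0 * sides.getD (i + 1) 0)
  else acc
termination_by sides.length - i

def max_rectangle_area_alt (arr : List Int) : Int :=
  let counts := arr.foldl (fun d x => d.insert x (d.getD x 0 + 1)) PySem.Dict.empty
  let ks := PySem.List.sorted counts.keys (fun x => x) true
  let st := ks.foldl (pvStepB counts) ([], none)
  pvAreaIdx st.1 0 0

-- ===== PRECONDITION & SPEC =====
def Spec_max_rectangle_area (arr : List Int) (out : Int) : Prop := out = max_rectangle_area_alt arr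
instance (arr : List Int) (out : Int) : Decidable (Spec_max_rectangle_area arr out) := by unfold Spec_max_rectangle_area; infer_instance

-- ===== CLAIM (what is proved, stated in full; the proofs are below) =====
def Claim_equal_max_rectangle_area : Prop := ∀ (arr : List Int), Dom_max_rectangle_area arr → Spec_max_rectangle_area arr (max_rectangle_area arr)

-- ===== LEMMAS AND PROOFS =====

-- canonical description of the matched sides: a structural scan of the sorted list
def pvCollect : List Int → List Int
  | a :: b :: t => if a - b ≤ 1 then b :: pvCollect t else pvCollect (b :: t)
  | _ => []
termination_by l => l.length

def pvPairProd : List Int → Int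
  | x :: y :: t => x * y + pvPairProd t
  | _ => 0

def pvOcons : Option Int → List Int → List Int
  | none, l => l
  | some x, l => x :: l

-- the runs expansion of the distinct values with their counts
def pvRuns (c : Int → Int) : List Int → List Int
  | [] => []
  | v :: t => List.replicate (c v).toNat v ++ pvRuns c t

-- the sides B's value loop produces, as structural recursion over the distinct values
def pvG (c : Int → Int) : Option Int → List Int → List Int
  | _, [] => []
  | carry, v :: t =>
      let p : List Int × Int :=
        match carry with
        | some cp => if cp - 1 = v then ([v], c v - 1) else ([], c v)
        | none => ([], c v)
      p.1 ++ List.replicate ((PySem.Int.floordiv p.2 2)).toNat v ++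
        pvG c (if PySem.Int.mod p.2 2 ≠ 0 then some v else none) t

lemma pvPairProd_short (pairs : List Int) (h : pairs.length ≤ 1) : pvPairProd pairs = 0 := by
  match pairs, h with
  | [], _ => rfl
  | [_], _ => rfl

lemma pvCollect_short (l : List Int) (h : l.length ≤ 1) : pvCollect l = [] := by
  match l, h with
  | [], _ => simp [pvCollect]
  | [_], _ => simp [pvCollect]

-- A's loop invariant: from index r with buffer `pairs` it adds the pairwise product of `pairs`
-- followed by the sides collected from the remaining suffix
lemma pvLoopA_eq (l : List Int) (hl : l.Pairwise (fun a b => b ≤ a)) :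
    ∀ (n r : Nat) (pairs : List Int) (acc : Int), l.length ≤ n + r → 1 ≤ r →
      pairs.length ≤ 1 →
      pvLoopA l r pairs acc = acc + pvPairProd (pairs ++ pvCollect (l.drop (r - 1))) := by
  intro n
  induction n with
  | zero =>
    intro r pairs acc hn hr hp
    rw [pvLoopA]
    simp only [Nat.zero_add] at hn
    rw [dif_neg (by omega)]
    rw [pvCollect_short _ (by simp; omega), List.append_nil, pvPairProd_short _ hp]
    omega
  | succ n ih =>
    intro r pairs acc hn hr hp
    by_cases hlt : r < l.length
    · have h1 : r - 1 < l.length := by omega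
      have hd1 : l.drop (r - 1) = l[r - 1] :: l.drop r := by
        have := List.drop_eq_getElem_cons h1
        rwa [show r - 1 + 1 = r by omega] at this
      have hd2 : l.drop r = l[r] :: l.drop (r + 1) := List.drop_eq_getElem_cons hlt
      have hg1 : l.getD (r - 1) 0 = l[r - 1] := List.getD_eq_getElem l 0 h1
      have hg2 : l.getD r 0 = l[r] := List.getD_eq_getElem l 0 hlt
      have hge : l[r] ≤ l[r - 1] := by
        rcases List.pairwise_iff_getElem.mp hl (r - 1) r h1 hlt (by omega) with h
        exact h
      rw [pvLoopA, dif_pos hlt, hg1, hg2]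
      by_cases hc : l[r - 1] = l[r] ∨ l[r - 1] - 1 = l[r]
      · rw [if_pos hc]
        have hcB : l[r - 1] - l[r] ≤ 1 := by omega
        match pairs, hp with
        | [], _ =>
          simp only [List.nil_append]
          rw [if_neg (by simp)]
          rw [ih (r + 2) [l[r]] acc (by omega) (by omega) (by simp)]
          rw [hd1, hd2, pvCollect]
          rw [if_pos hcB]
          simp
        | [p], _ =>
          simp only [List.cons_append, List.nil_append]
          rw [if_pos (by simp)]
          rw [ih (r + 2) [] _ (by omega) (by omega) (by simp)]
          rw [hd1, hd2, pvCollect]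
          rw [if_pos hcB]
          rw [show r + 2 - 1 = r + 1 by omega]
          simp only [List.getD, List.getElem?_cons_zero, List.getElem?_cons_succ,
            Option.getD_some, pvPairProd, List.nil_append]
          ring
      · rw [if_neg hc]
        rw [if_neg (by omega)]
        rw [ih (r + 1) pairs acc (by omega) (by omega) hp]
        have hcB : ¬ (l[r - 1] - l[r] ≤ 1) := by omega
        rw [hd1, hd2, pvCollect, if_neg hcB, ← hd2, Nat.add_sub_cancel]
    · rw [pvLoopA, dif_neg hlt]
      rw [pvCollect_short _ (by simp; omega), List.append_nil, pvPairProd_short _ hp]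
      omega

-- B's value fold appends pvG to the accumulated sides
lemma foldl_stepB (counts : PySem.Dict Int Int) :
    ∀ (ks : List Int) (sides : List Int) (carry : Option Int),
      (ks.foldl (pvStepB counts) (sides, carry)).1 =
        sides ++ pvG (fun v => counts.getD v 0) carry ks := by
  intro ks
  induction ks with
  | nil => intro sides carry; simp [pvG]
  | cons v t ih =>
    intro sides carry
    match carry with
    | none =>
      simp only [List.foldl_cons, pvStepB, PySem.List.pyRepeat_singleton]
      rw [ih]
      simp [pvG]
    | some cp =>
      by_cases hc : cp - 1 = v
      · simp only [List.foldl_cons, pvStepB, PySem.List.pyRepeat_singleton, if_pos hc]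
        rw [ih]
        simp [pvG, if_pos hc]
      · simp only [List.foldl_cons, pvStepB, PySem.List.pyRepeat_singleton, if_neg hc]
        rw [ih]
        simp [pvG, if_neg hc]

-- collecting over a run of k equal values
lemma pvCollect_replicate :
    ∀ (k : Nat) (v : Int) (rest : List Int),
      pvCollect (List.replicate k v ++ rest) =
        List.replicate (k / 2) v ++
          pvCollect (pvOcons (if k % 2 = 1 then some v else none) rest) := by
  intro k
  induction k using Nat.strong_induction_on with
  | _ k ih =>
    match k with
    | 0 => intro v rest; simp [pvOcons]
    | 1 => intro v rest; simp [pvOcons, List.replicate]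
    | (n + 2) =>
      intro v rest
      have h2 : List.replicate (n + 2) v ++ rest = v :: v :: (List.replicate n v ++ rest) := by
        simp [List.replicate]
      rw [h2, pvCollect, if_pos (by omega), ih n (by omega) v rest]
      have hdiv : (n + 2) / 2 = n / 2 + 1 := by omega
      have hmod : (n + 2) % 2 = n % 2 := by omega
      rw [hdiv, hmod]
      simp [List.replicate]

-- main bridge: scanning the runs expansion equals B's carry loop over the distinct values
lemma pvCollect_runs (c : Int → Int) :
    ∀ (ks : List Int), ks.Pairwise (fun a b => b < a) → (∀ v ∈ ks, 1 ≤ c v) →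
      ∀ (carry : Option Int), (∀ cp, carry = some cp → ∀ v ∈ ks, v < cp) →
        pvCollect (pvOcons carry (pvRuns c ks)) = pvG c carry ks := by
  intro ks
  induction ks with
  | nil =>
    intro _ _ carry _
    match carry with
    | none => simp [pvRuns, pvG, pvOcons, pvCollect]
    | some cp => simp [pvRuns, pvG, pvOcons, pvCollect_short]
  | cons v t ih =>
    intro hdesc hcnt carry hcarry
    have hdesc_t : t.Pairwise (fun a b => b < a) := (List.pairwise_cons.mp hdesc).2
    have hvt : ∀ w ∈ t, w < v := (List.pairwise_cons.mp hdesc).1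
    have hcv : 1 ≤ c v := hcnt v (by simp)
    have hcnt_t : ∀ w ∈ t, 1 ≤ c w := fun w hw => hcnt w (by simp [hw])
    have hkn : 1 ≤ (c v).toNat := by omega
    -- the shared "no pairing with the carry" computation
    have hnone : pvCollect (pvRuns c (v :: t)) =
        List.replicate ((c v).toNat / 2) v ++
          pvG c (if (c v).toNat % 2 = 1 then some v else none) t := by
      rw [pvRuns, pvCollect_replicate]
      by_cases hpar : (c v).toNat % 2 = 1
      · simp only [if_pos hpar]
        exact congrArg _ (ih hdesc_t hcnt_t (some v)
          (by intro cp hcp w hw; cases hcp; exact hvt w hw))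
      · simp only [if_neg hpar]
        exact congrArg _ (ih hdesc_t hcnt_t none (by intro cp hcp; cases hcp))
    have hbridge : ∀ (m : Int), 0 ≤ m →
        (PySem.Int.floordiv m 2).toNat = m.toNat / 2 ∧
          ((PySem.Int.mod m 2 ≠ 0) ↔ m.toNat % 2 = 1) := by
      intro m hm
      have hfd : PySem.Int.floordiv m 2 = m / 2 := by
        unfold PySem.Int.floordiv
        exact Int.fdiv_eq_ediv_of_nonneg _ (by norm_num)
      have hmd : PySem.Int.mod m 2 = m % 2 := by
        unfold PySem.Int.mod
        rw [Int.fmod_eq_emod]; simp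
      constructor
      · rw [hfd]; omega
      · rw [hmd]; omega
    match carry with
    | none =>
      rw [pvOcons, hnone, pvG]
      simp only []
      obtain ⟨hf, hm⟩ := hbridge (c v) (by omega)
      rw [hf]
      by_cases hpar : (c v).toNat % 2 = 1
      · rw [if_pos hpar, if_pos (hm.mpr hpar)]; simp
      · rw [if_neg hpar, if_neg (fun h => hpar (hm.mp h))]; simp
    | some cp =>
      have hvcp : v < cp := hcarry cp rfl v (by simp)
      by_cases hc : cp - 1 = v
      · -- the carry pairs with one element of the v-run
        have hrun : pvOcons (some cp) (pvRuns c (v :: t)) =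
            cp :: v :: (List.replicate ((c v).toNat - 1) v ++ pvRuns c t) := by
          rw [pvOcons, pvRuns]
          have : List.replicate (c v).toNat v = v :: List.replicate ((c v).toNat - 1) v := by
            rw [← List.replicate_succ]
            congr 1
            omega
          rw [this]
          simp
        rw [hrun, pvCollect, if_pos (by omega), pvCollect_replicate, pvG]
        simp only [if_pos hc]
        obtain ⟨hf, hm⟩ := hbridge (c v - 1) (by omega)
        have htn : (c v - 1).toNat = (c v).toNat - 1 := by omega
        rw [hf, htn]
        by_cases hpar : ((c v).toNat - 1) % 2 = 1
        · rw [if_pos hpar, if_pos (by rw [hm, htn]; exact hpar)]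
          rw [ih hdesc_t hcnt_t (some v) (by intro x hx w hw; cases hx; exact hvt w hw)]
          simp
        · rw [if_neg hpar, if_neg (by rw [hm, htn]; exact hpar)]
          rw [ih hdesc_t hcnt_t none (by intro x hx; cases hx)]
          simp
      · -- the carry is skipped (difference at least 2)
        have hrun : pvOcons (some cp) (pvRuns c (v :: t)) =
            cp :: v :: (List.replicate ((c v).toNat - 1) v ++ pvRuns c t) := by
          rw [pvOcons, pvRuns]
          have : List.replicate (c v).toNat v = v :: List.replicate ((c v).toNat - 1) v := by
            rw [← List.replicate_succ]
            congr 1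
            omega
          rw [this]
          simp
        have hback : v :: (List.replicate ((c v).toNat - 1) v ++ pvRuns c t) =
            pvRuns c (v :: t) := by
          rw [pvRuns]
          have : List.replicate (c v).toNat v = v :: List.replicate ((c v).toNat - 1) v := by
            rw [← List.replicate_succ]
            congr 1
            omega
          rw [this]
          simp
        rw [hrun, pvCollect, if_neg (by omega), hback, hnone, pvG]
        simp only [if_neg hc]
        obtain ⟨hf, hm⟩ := hbridge (c v) (by omega)
        rw [hf]
        by_cases hpar : (c v).toNat % 2 = 1
        · rw [if_pos hpar, if_pos (hm.mpr hpar)]; simp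
        · rw [if_neg hpar, if_neg (fun h => hpar (hm.mp h))]; simp

-- the runs expansion of the descending distinct values IS the descending-sorted list
lemma count_pvRuns (c : Int → Int) :
    ∀ (ks : List Int), ks.Nodup → ∀ (x : Int),
      (pvRuns c ks).count x = if x ∈ ks then (c x).toNat else 0 := by
  intro ks
  induction ks with
  | nil => intro _ x; simp [pvRuns]
  | cons v t ih =>
    intro hnd x
    have hnd' := List.nodup_cons.mp hnd
    rw [pvRuns, List.count_append, List.count_replicate, ih hnd'.2 x]
    by_cases hxv : x = v
    · subst hxv
      simp [hnd'.1]
    · by_cases hxt : x ∈ t <;> simp [hxv, Ne.symm hxv, hxt]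

lemma mem_pvRuns (c : Int → Int) :
    ∀ (ks : List Int) (x : Int), x ∈ pvRuns c ks → x ∈ ks := by
  intro ks
  induction ks with
  | nil => intro x h; simp [pvRuns] at h
  | cons v t ih =>
    intro x h
    rw [pvRuns, List.mem_append] at h
    rcases h with h | h
    · simp [List.eq_of_mem_replicate h]
    · simp [ih x h]

lemma pairwise_pvRuns (c : Int → Int) :
    ∀ (ks : List Int), ks.Pairwise (fun a b => b < a) →
      (pvRuns c ks).Pairwise (fun a b => b ≤ a) := by
  intro ks
  induction ks with
  | nil => intro _; simp [pvRuns]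
  | cons v t ih =>
    intro hdesc
    have hp := List.pairwise_cons.mp hdesc
    rw [pvRuns, List.pairwise_append]
    refine ⟨List.pairwise_replicate.mpr (Or.inr le_rfl), ih hp.2, ?_⟩
    intro x hx y hy
    have hxv : x = v := List.eq_of_mem_replicate hx
    have hyt : y ∈ t := mem_pvRuns c t y hy
    have := hp.1 y hyt
    omega

lemma pvAreaIdx_eq (sides : List Int) :
    ∀ (n i : Nat) (acc : Int), sides.length ≤ n + i →
      pvAreaIdx sides i acc = acc + pvPairProd (sides.drop i) := by
  intro n
  induction n with
  | zero =>
    intro i acc hn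
    rw [pvAreaIdx, dif_neg (by omega)]
    rw [pvPairProd_short _ (by simp; omega)]
    omega
  | succ n ih =>
    intro i acc hn
    by_cases hlt : i + 1 < sides.length
    · have hd1 : sides.drop i = sides[i] :: sides.drop (i + 1) :=
        List.drop_eq_getElem_cons (by omega)
      have hd2 : sides.drop (i + 1) = sides[i + 1] :: sides.drop (i + 2) :=
        List.drop_eq_getElem_cons hlt
      rw [pvAreaIdx, dif_pos hlt, ih (i + 2) _ (by omega),
        List.getD_eq_getElem sides 0 (by omega), List.getD_eq_getElem sides 0 hlt,
        hd1, hd2, pvPairProd]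
      ring
    · rw [pvAreaIdx, dif_neg hlt, pvPairProd_short _ (by simp; omega)]
      omega

-- ===== VERDICT (by name: the statement is the Claim_ definition above) =====
theorem max_rectangle_area_spec : Claim_equal_max_rectangle_area := by
  intro arr _
  unfold Spec_max_rectangle_area max_rectangle_area max_rectangle_area_alt
  set l := PySem.List.sorted arr (fun x => x) true with hlset
  have hl : l.Pairwise (fun a b => b ≤ a) := PySem.List.sorted_pairwise_rev arr (fun x => x)
  -- A's side: pvPairProd of the canonical scan of the sorted list
  rw [pvLoopA_eq l hl l.length 1 [] 0 (by omega) (by omega) (by simp)]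
  simp only [List.nil_append, List.drop_zero, Nat.sub_self, Int.zero_add]
  -- B's side
  have hcounter : arr.foldl (fun d x => d.insert x (d.getD x 0 + 1)) PySem.Dict.empty =
      PySem.Dict.counter arr := PySem.Dict.foldl_insert_getD_add_one_eq_counter arr
  rw [hcounter]
  set ks := PySem.List.sorted (PySem.Dict.counter arr).keys (fun x => x) true with hksset
  rw [foldl_stepB]
  simp only [List.nil_append]
  have hcfun : (fun v => (PySem.Dict.counter arr).getD v 0) = fun v => (arr.count v : Int) := by
    funext v
    exact PySem.Dict.getD_counter arr v
  rw [hcfun]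
  rw [pvAreaIdx_eq _ (pvG (fun v => (arr.count v : Int)) none ks).length 0 0 (by omega)]
  simp only [Int.zero_add, List.drop_zero]
  set c : Int → Int := fun v => (arr.count v : Int) with hcset
  -- ks is the strictly descending list of distinct values of arr
  have hkeys : (PySem.Dict.counter arr).keys = PySem.Set.ofList arr :=
    PySem.Dict.keys_counter arr
  have hks_perm : ks.Perm (PySem.Set.ofList arr) := by
    rw [hksset, hkeys]
    exact PySem.List.sorted_perm _ _ _
  have hks_nodup : ks.Nodup := hks_perm.nodup_iff.mpr (PySem.Set.nodup_ofList arr)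
  have hks_ge : ks.Pairwise (fun a b => b ≤ a) := by
    rw [hksset, hkeys]
    exact PySem.List.sorted_pairwise_rev _ _
  have hks_desc : ks.Pairwise (fun a b => b < a) := by
    have hne : ks.Pairwise (fun a b => a ≠ b) := hks_nodup
    exact (hks_ge.and hne).imp (fun h => lt_of_le_of_ne h.1 (Ne.symm h.2))
  have hks_mem : ∀ x, x ∈ ks ↔ x ∈ arr := by
    intro x
    rw [hks_perm.mem_iff]
    exact (PySem.Set.mem_ofList (xs := arr) (y := x))
  have hcnt : ∀ v ∈ ks, 1 ≤ c v := by
    intro v hv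
    have : 0 < arr.count v := List.count_pos_iff.mpr ((hks_mem v).mp hv)
    simp only [hcset]
    omega
  -- the runs expansion equals the sorted list
  have hperm_runs : (pvRuns c ks).Perm arr := by
    rw [List.perm_iff_count]
    intro x
    rw [count_pvRuns c ks hks_nodup x]
    by_cases hx : x ∈ ks
    · rw [if_pos hx]
      simp [hcset]
    · rw [if_neg hx]
      have : x ∉ arr := fun h => hx ((hks_mem x).mpr h)
      simp [List.count_eq_zero.mpr this]
  have hruns_sorted : (pvRuns c ks).Pairwise (fun a b => b ≤ a) :=
    pairwise_pvRuns c ks hks_desc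
  have hperm_l : (pvRuns c ks).Perm l := hperm_runs.trans (PySem.List.sorted_perm _ _ _).symm
  have hruns_eq : pvRuns c ks = l := by
    exact List.Perm.eq_of_pairwise (fun a _ b _ h1 h2 => le_antisymm h2 h1)
      hruns_sorted hl hperm_l
  -- conclude via the main bridge
  have hmain := pvCollect_runs c ks hks_desc hcnt none (by intro cp hcp; cases hcp)
  rw [pvOcons, hruns_eq] at hmain
  rw [← hmain]
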